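-- pv_equiv track=rewrite | github.com/jason-bourne-gg/Advertising-Tool-Backend | src/apis/createCampaignAPIs/getPayloadFunction/getpayloadfunction.py | between_group
-- ===== SOURCE A (Python) =====
-- def between_group(x):
--     flag =0
--     op = []
--     for y in x:
--         flag= flag+1
--         if(y=='A' or y=='O' ):
--             start = flag
--
--             if(x[start-1:start+2]=='AND'):
--                 op.append('AND')
--             if(x[start-1:start+1]=='OR'):
--                 op.append('OR')
--
--     return op
-- ===== SOURCE B (Python) =====
-- import re
--
-- def between_group(x):
--     return re.findall('AND|OR', x)
-- ===== Notes on version B (the rewrite author's own statement) =====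
-- stated objective: idiomatic
-- what changed: Replaces the manual per-character counter/slice scan with a single call to re.findall matching either token; since the two tokens start with different letters and cannot overlap, the non-overlapping left-to-right regex matches are exactly the occurrences A collects, in the same order.
import Mathlib
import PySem

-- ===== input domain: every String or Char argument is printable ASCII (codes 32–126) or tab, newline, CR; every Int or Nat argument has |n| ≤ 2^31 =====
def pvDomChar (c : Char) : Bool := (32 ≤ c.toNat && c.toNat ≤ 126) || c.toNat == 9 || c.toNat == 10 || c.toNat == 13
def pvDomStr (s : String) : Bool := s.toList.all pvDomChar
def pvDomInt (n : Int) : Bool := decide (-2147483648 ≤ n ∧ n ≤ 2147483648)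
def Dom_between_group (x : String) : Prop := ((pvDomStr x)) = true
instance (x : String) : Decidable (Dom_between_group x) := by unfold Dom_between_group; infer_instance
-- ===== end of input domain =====

-- B replaces A's manual counter-and-slice character scan by a regex search (re.findall('AND|OR', x)): more idiomatic, same values.

-- ===== PORT A =====
-- one step of A's for-loop: state is (flag, op)
def pvStepA (xs : List Char) (st : Int × List String) (y : Char) : Int × List String :=
  let flag := st.1 + 1
  if y = 'A' ∨ y = 'O' then
    let start := flag
    let op1 := if PySem.List.slice xs (some (start - 1)) (some (start + 2)) = ['A', 'N', 'D']
               then st.2 ++ ["AND"] else st.2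
    let op2 := if PySem.List.slice xs (some (start - 1)) (some (start + 1)) = ['O', 'R']
               then op1 ++ ["OR"] else op1
    (flag, op2)
  else (flag, st.2)

def between_group (x : String) : List String :=
  (x.toList.foldl (pvStepA x.toList) ((0 : Int), ([] : List String))).2

-- ===== PORT B =====
-- left-to-right non-overlapping scan for the regex 'AND|OR' (the matching discipline of re.findall)
def pvFindAndOr : List Char → List String
  | [] => []
  | y :: rest =>
    if y = 'A' ∧ rest.take 2 = ['N', 'D'] then "AND" :: pvFindAndOr (rest.drop 2)
    else if y = 'O' ∧ rest.take 1 = ['R'] then "OR" :: pvFindAndOr (rest.drop 1)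
    else pvFindAndOr rest
termination_by l => l.length
decreasing_by
  all_goals simp

def between_group_alt (x : String) : List String := pvFindAndOr x.toList

-- ===== PRECONDITION & SPEC =====
def Spec_between_group (x : String) (out : List String) : Prop := out = between_group_alt x
instance (x : String) (out : List String) : Decidable (Spec_between_group x out) := by unfold Spec_between_group; infer_instance

-- ===== CLAIM (what is proved, stated in full; the proofs are below) =====
def Claim_equal_between_group : Prop := ∀ (x : String), Dom_between_group x → Spec_between_group x (between_group x)

-- ===== LEMMAS AND PROOFS =====

-- the per-position contribution of B's scan equals the token tests A performs on the slices at that position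
lemma pvFindAndOr_cons (y : Char) (rest : List Char) :
    pvFindAndOr (y :: rest) =
      (if y = 'A' ∨ y = 'O' then
        (if (y :: rest).take 3 = ['A', 'N', 'D'] then ["AND"] else []) ++
        (if (y :: rest).take 2 = ['O', 'R'] then ["OR"] else [])
       else []) ++ pvFindAndOr rest := by
  by_cases h1 : y = 'A' ∧ rest.take 2 = ['N', 'D']
  · obtain ⟨hy, ht⟩ := h1
    subst hy
    rcases rest with _ | ⟨c1, _ | ⟨c2, r⟩⟩ <;> simp at ht
    obtain ⟨h1, h2⟩ := ht
    subst h1; subst h2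
    simp [pvFindAndOr]
  · by_cases h2 : y = 'O' ∧ rest.take 1 = ['R']
    · obtain ⟨hy, ht⟩ := h2
      subst hy
      rcases rest with _ | ⟨c1, r⟩ <;> simp at ht
      subst ht
      simp [pvFindAndOr]
    · rw [pvFindAndOr]
      rw [if_neg h1, if_neg h2]
      simp
      exact fun _ => ⟨fun hy h => h1 ⟨hy, h⟩, fun hy h => h2 ⟨hy, h⟩⟩

-- one loop step of A, rephrased with the slices evaluated at position n
lemma pvStepA_eq (xs : List Char) (n : Nat) (op : List String) (y : Char) :
    pvStepA xs ((n : Int), op) y =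
      ((n : Int) + 1, op ++
        (if y = 'A' ∨ y = 'O' then
          (if (xs.drop n).take 3 = ['A', 'N', 'D'] then ["AND"] else []) ++
          (if (xs.drop n).take 2 = ['O', 'R'] then ["OR"] else [])
         else [])) := by
  unfold pvStepA
  simp only [show (n : Int) + 1 - 1 = ((n : Nat) : Int) from by ring,
    show (n : Int) + 1 + 2 = (((n + 3 : Nat)) : Int) from by push_cast; ring,
    show (n : Int) + 1 + 1 = (((n + 2 : Nat)) : Int) from by push_cast; ring,
    PySem.List.slice_natCast]
  simp only [show n + 3 - n = 3 from by omega, show n + 2 - n = 2 from by omega]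
  split_ifs <;> simp

-- A's loop from position n over the remaining suffix produces op ++ B's scan of that suffix
lemma pvLoop_eq (xs : List Char) :
    ∀ (s : List Char) (n : Nat) (op : List String), xs.drop n = s →
      (s.foldl (pvStepA xs) ((n : Int), op)).2 = op ++ pvFindAndOr s := by
  intro s
  induction s with
  | nil => intro n op h; simp [pvFindAndOr]
  | cons y rest ih =>
    intro n op h
    rw [List.foldl_cons, pvStepA_eq, h]
    have hdrop : xs.drop (n + 1) = rest := by
      rw [← List.drop_drop, h]; simp
    have hcast : ((n : Int) + 1) = (((n + 1 : Nat)) : Int) := by push_cast; ring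
    rw [hcast, ih (n + 1) _ hdrop, pvFindAndOr_cons, List.append_assoc]

-- ===== VERDICT (by name: the statement is the Claim_ definition above) =====
theorem between_group_spec : Claim_equal_between_group := by
  intro x _
  unfold Spec_between_group between_group between_group_alt
  simpa using pvLoop_eq x.toList x.toList 0 [] (by simp)
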